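-- pv_equiv track=rewrite | github.com/bomsoo-kim/text_tools | longest_common_token_sequence.py | find_tokens
-- ===== SOURCE A (Python) =====
-- def is_word_char(c, word_char_set=set('abcdefghijklmnopqrstuvwxyzABCDEFGHIJKLMNOPQRSTUVWXYZ0123456789')):
--     return c in word_char_set
--
-- def find_tokens(text):
--     #--- forward cumulutive sum of characters -----------------------
--     csum = [0] * len(text) # initialize to zeros
--     for i in range(len(text)-1, -1, -1):
--         if is_word_char(text[i]):
--             if i == len(text)-1: # if the very last charcter
--                 csum[i] = 1
--             else:
--                 csum[i] = csum[i+1] + 1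
--
--     #--- token connectivity = root ----------------------------------
--     root = [None] * len(text)
--     ii, cnt = {}, 0
--     for i in range(len(text)):
--         if is_word_char(text[i]):
--             if i == 0 or not is_word_char(text[i-1]): # if the initial character of each token
--                 i_initial = i
--                 ii[i], cnt = cnt, cnt + 1
--             root[i] = i_initial
--
--     return csum, root, ii
-- ===== SOURCE B (Python) =====
-- def find_tokens(text):
--     # One forward run-based scan instead of A's two index passes.
--     word = set('abcdefghijklmnopqrstuvwxyzABCDEFGHIJKLMNOPQRSTUVWXYZ0123456789')
--     n = len(text)
--     csum, root, ii = [], [], {}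
--     cnt = 0
--     i = 0
--     while i < n:
--         if text[i] in word:
--             s = i
--             while i < n and text[i] in word:
--                 i += 1
--             k = i - s
--             ii[s] = cnt
--             cnt += 1
--             csum.extend(range(k, 0, -1))
--             root.extend([s] * k)
--         else:
--             csum.append(0)
--             root.append(None)
--             i += 1
--     return csum, root, ii
-- ===== Notes on version B (the rewrite author's own statement) =====
-- stated objective: alternative
-- what changed: A makes two separate index-based passes over the string (a backward cumulative-count pass plus a forward token-start pass with a carried i_initial); B makes one forward scan over maximal word-character runs, emitting csum, root and ii for each whole run at once.
import Mathlib
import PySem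

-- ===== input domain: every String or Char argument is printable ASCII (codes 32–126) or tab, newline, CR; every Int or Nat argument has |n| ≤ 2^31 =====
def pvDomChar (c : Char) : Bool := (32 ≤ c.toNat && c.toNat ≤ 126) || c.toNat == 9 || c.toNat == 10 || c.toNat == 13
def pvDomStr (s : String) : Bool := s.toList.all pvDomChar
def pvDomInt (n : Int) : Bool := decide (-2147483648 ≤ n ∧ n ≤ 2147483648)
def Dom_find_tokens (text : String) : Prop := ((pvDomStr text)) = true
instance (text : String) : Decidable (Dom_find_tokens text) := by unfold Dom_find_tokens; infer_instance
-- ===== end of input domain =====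

-- B replaces A's two separate index passes (a backward cumulative pass and a forward
-- start-detection pass) by one forward scan over maximal word-character runs; objective: alternative.

set_option maxRecDepth 8192

-- ===== PORT A =====
-- Python's word_char_set = set(letters+digits): the 62 characters are distinct, so the set
-- IS this character list (PySem.Set.ofList_eq_self_of_nodup) and 'c in word_char_set' is
-- List.contains on it — exact, and fast enough for the evaluator.
def word_char_set : PySem.Set Char :=
  "abcdefghijklmnopqrstuvwxyzABCDEFGHIJKLMNOPQRSTUVWXYZ0123456789".toList

def is_word_char (c : Char) : Bool := List.contains word_char_set c

-- body of A's first (backward) loop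
def csum_step (l : List Char) (cs : List Int) (i : Int) : List Int :=
  if is_word_char (PySem.List.pyGetD l i ' ') then
    PySem.List.pySetD cs i
      (if i == (l.length : Int) - 1 then 1 else PySem.List.pyGetD cs (i + 1) 0 + 1)
  else cs

-- body of A's second (forward) loop; state = (root, ii, cnt, i_initial).
-- i_initial starts as junk 0: Python leaves it unassigned, and it is never read before
-- being assigned (every word character is preceded by a token start in the same pass).
def root_step (l : List Char)
    (st : List (Option Int) × PySem.Dict Int Int × Int × Int) (i : Int) :
    List (Option Int) × PySem.Dict Int Int × Int × Int :=
  if is_word_char (PySem.List.pyGetD l i ' ') then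
    if (i == 0) || !is_word_char (PySem.List.pyGetD l (i - 1) ' ') then
      (PySem.List.pySetD st.1 i (some i), st.2.1.insert i st.2.2.1, st.2.2.1 + 1, i)
    else
      (PySem.List.pySetD st.1 i (some st.2.2.2), st.2.1, st.2.2.1, st.2.2.2)
  else st

def find_tokens (text : String) : List Int × List (Option Int) × (List (Int × Int)) :=
  let l := text.toList
  let n : Int := l.length
  let csum := (PySem.List.pyRange (n - 1) (-1) (-1)).foldl (csum_step l)
      (List.replicate l.length (0 : Int))
  let fin := (PySem.List.pyRange 0 n 1).foldl (root_step l)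
      (List.replicate l.length (none : Option Int), PySem.Dict.empty, 0, 0)
  (csum, fin.1, fin.2.1.items)

-- ===== PORT B =====
-- one forward scan over maximal word-character runs (Source B's while-loop)
def scan_runs : List Char → Int → Int → List Int × List (Option Int) × List (Int × Int)
  | [], _, _ => ([], [], [])
  | c :: cs, pos, cnt =>
    if h : is_word_char c = true then
      let k := ((c :: cs).takeWhile is_word_char).length
      let r := scan_runs ((c :: cs).dropWhile is_word_char) (pos + (k : Int)) (cnt + 1)
      (PySem.List.pyRange (k : Int) 0 (-1) ++ r.1,
       List.replicate k (some pos) ++ r.2.1,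
       (pos, cnt) :: r.2.2)
    else
      let r := scan_runs cs (pos + 1) cnt
      (0 :: r.1, none :: r.2.1, r.2.2)
termination_by l _ _ => l.length
decreasing_by
  · simp only [List.dropWhile_cons, h, if_true, List.length_cons]
    exact Nat.lt_succ_of_le (List.length_dropWhile_le _ _)
  · simp

def find_tokens_alt (text : String) : List Int × List (Option Int) × (List (Int × Int)) :=
  scan_runs text.toList 0 0

-- ===== PRECONDITION & SPEC =====
def Spec_find_tokens (text : String) (out : List Int × List (Option Int) × (List (Int × Int))) : Prop := out = find_tokens_alt text
instance (text : String) (out : List Int × List (Option Int) × (List (Int × Int))) : Decidable (Spec_find_tokens text out) := by unfold Spec_find_tokens; infer_instance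

-- ===== CLAIM (what is proved, stated in full; the proofs are below) =====
def Claim_equal_find_tokens : Prop := ∀ (text : String), Dom_find_tokens text → Spec_find_tokens text (find_tokens text)

-- ===== LEMMAS AND PROOFS =====

lemma scan_runs_nil (pos cnt : Int) : scan_runs [] pos cnt = ([], [], []) := by
  rw [scan_runs]

lemma scan_runs_cons_word (c : Char) (cs : List Char) (pos cnt : Int)
    (h : is_word_char c = true) :
    scan_runs (c :: cs) pos cnt =
      ((PySem.List.pyRange (((c :: cs).takeWhile is_word_char).length : Int) 0 (-1)) ++
         (scan_runs ((c :: cs).dropWhile is_word_char)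
            (pos + (((c :: cs).takeWhile is_word_char).length : Int)) (cnt + 1)).1,
       List.replicate ((c :: cs).takeWhile is_word_char).length (some pos) ++
         (scan_runs ((c :: cs).dropWhile is_word_char)
            (pos + (((c :: cs).takeWhile is_word_char).length : Int)) (cnt + 1)).2.1,
       (pos, cnt) ::
         (scan_runs ((c :: cs).dropWhile is_word_char)
            (pos + (((c :: cs).takeWhile is_word_char).length : Int)) (cnt + 1)).2.2) := by
  rw [scan_runs]
  simp [h]

lemma scan_runs_cons_nonword (c : Char) (cs : List Char) (pos cnt : Int)
    (h : is_word_char c = false) :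
    scan_runs (c :: cs) pos cnt =
      (0 :: (scan_runs cs (pos + 1) cnt).1,
       none :: (scan_runs cs (pos + 1) cnt).2.1,
       (scan_runs cs (pos + 1) cnt).2.2) := by
  rw [scan_runs]
  simp [h]

-- spec of the csum column: remaining run length at each position
def csumSpec : List Char → List Int
  | [] => []
  | c :: cs => (if is_word_char c then (csumSpec cs).headD 0 + 1 else 0) :: csumSpec cs

lemma is_word_char_space : is_word_char ' ' = false := by decide

lemma headD_csumSpec (rest : List Char) (h : is_word_char (rest.headD ' ') = false) :
    (csumSpec rest).headD 0 = 0 := by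
  cases rest with
  | nil => simp [csumSpec]
  | cons c cs => simp only [List.headD_cons] at h; simp [csumSpec, h]

lemma dropWhile_headD_false (p : Char → Bool) (hsp : p ' ' = false) :
    ∀ xs : List Char, p ((List.dropWhile p xs).headD ' ') = false := by
  intro xs
  induction xs with
  | nil => simpa using hsp
  | cons c cs ih =>
    by_cases hc : p c = true
    · simpa [hc] using ih
    · simp only [Bool.not_eq_true] at hc
      simp [hc]

lemma head?_dropWhile_false (xs : List Char) :
    ∀ c ∈ (List.dropWhile is_word_char xs).head?, is_word_char c = false := by
  intro c hc
  have h := dropWhile_headD_false is_word_char is_word_char_space xs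
  cases hd : List.dropWhile is_word_char xs with
  | nil => rw [hd] at hc; simp at hc
  | cons d ds =>
    rw [hd] at hc h
    simp only [List.head?_cons, Option.mem_def, Option.some.injEq] at hc
    simpa [← hc] using h

lemma csumSpec_run : ∀ (run rest : List Char),
    (∀ c ∈ run, is_word_char c = true) →
    is_word_char (rest.headD ' ') = false →
    csumSpec (run ++ rest) = PySem.List.pyRange (run.length : Int) 0 (-1) ++ csumSpec rest := by
  intro run
  induction run with
  | nil =>
    intro rest _ _
    simp [PySem.List.pyRange_neg_one_eq_nil]
  | cons c run' ih =>
    intro rest hall hrest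
    have hc : is_word_char c = true := hall c (by simp)
    have ih' := ih rest (fun c h => hall c (by simp [h])) hrest
    have hhead2 : (PySem.List.pyRange ((run'.length : Nat) : Int) 0 (-1) ++ csumSpec rest).headD 0
        = ((run'.length : Nat) : Int) := by
      cases run' with
      | nil => simpa [PySem.List.pyRange_neg_one_eq_nil] using headD_csumSpec rest hrest
      | cons d run'' =>
        rw [PySem.List.pyRange_neg_one_cons (by simp only [List.length_cons]; omega)]
        simp
    have hcast : (((run'.length + 1 : Nat)) : Int) - 1 = ((run'.length : Nat) : Int) := by omega
    have hcons : PySem.List.pyRange (((run'.length + 1 : Nat)) : Int) 0 (-1)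
        = (((run'.length + 1 : Nat)) : Int) :: PySem.List.pyRange ((run'.length : Nat) : Int) 0 (-1) := by
      rw [PySem.List.pyRange_neg_one_cons (by omega), hcast]
    simp only [List.cons_append, csumSpec, hc, if_true, ih', List.length_cons, hhead2]
    rw [hcons]
    push_cast
    simp

lemma scan_runs_csum_aux : ∀ (fuel : Nat) (xs : List Char), xs.length ≤ fuel →
    ∀ (pos cnt : Int), (scan_runs xs pos cnt).1 = csumSpec xs := by
  intro fuel
  induction fuel with
  | zero =>
    intro xs hle pos cnt
    have : xs = [] := List.eq_nil_of_length_eq_zero (by omega)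
    subst this
    simp [scan_runs_nil, csumSpec]
  | succ fuel ih =>
    intro xs hle pos cnt
    cases xs with
    | nil => simp [scan_runs_nil, csumSpec]
    | cons c cs =>
      by_cases hw : is_word_char c = true
      · rw [scan_runs_cons_word c cs pos cnt hw]
        have hrest_le : (List.dropWhile is_word_char cs).length ≤ fuel := by
          have := List.length_dropWhile_le is_word_char cs
          simp only [List.length_cons] at hle
          omega
        have hdw : (c :: cs).dropWhile is_word_char = cs.dropWhile is_word_char := by
          simp [hw]
        have htw : (c :: cs).takeWhile is_word_char = c :: cs.takeWhile is_word_char := by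
          simp [hw]
        rw [hdw, htw]
        rw [ih _ hrest_le]
        have hsplit : c :: cs = (c :: cs.takeWhile is_word_char) ++ cs.dropWhile is_word_char := by
          simp [List.takeWhile_append_dropWhile]
        conv_rhs => rw [hsplit]
        rw [csumSpec_run (c :: cs.takeWhile is_word_char) (cs.dropWhile is_word_char)
          (by intro x hx
              rcases List.mem_cons.mp hx with h | h
              · exact h ▸ hw
              · exact List.mem_takeWhile_imp h)
          (dropWhile_headD_false is_word_char is_word_char_space cs)]
      · simp only [Bool.not_eq_true] at hw
        rw [scan_runs_cons_nonword c cs pos cnt hw]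
        have : cs.length ≤ fuel := by simp only [List.length_cons] at hle; omega
        rw [ih _ this]
        simp [csumSpec, hw]

lemma getD_replicate_append : ∀ (k : Nat) (X : List Int),
    (List.replicate k (0 : Int) ++ X).getD k 0 = X.headD 0 := by
  intro k
  induction k with
  | zero => intro X; cases X <;> rfl
  | succ k ih => intro X; simpa [List.replicate_succ] using ih X

lemma set_append_len {α : Type} : ∀ (xs : List α) (a : α) (ys : List α) (v : α),
    (xs ++ a :: ys).set xs.length v = xs ++ v :: ys := by
  intro xs
  induction xs with
  | nil => intro a ys v; simp
  | cons x xs ih => intro a ys v; simp [ih]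

lemma set_append_len' {α : Type} (xs : List α) (a : α) (ys : List α) (v : α) (n : Nat)
    (h : xs.length = n) : (xs ++ a :: ys).set n v = xs ++ v :: ys := by
  subst h; exact set_append_len xs a ys v

-- A's backward fold computes csumSpec
lemma foldA_csum (l : List Char) : ∀ (m : Nat), m ≤ l.length →
    (PySem.List.pyRange ((m : Int) - 1) (-1) (-1)).foldl (csum_step l)
      (List.replicate m (0 : Int) ++ csumSpec (l.drop m)) = csumSpec l := by
  intro m
  induction m with
  | zero =>
    intro _
    rw [PySem.List.pyRange_neg_one_eq_nil (by omega)]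
    simp
  | succ m ih =>
    intro h1
    have hm : m < l.length := h1
    have hdrop_eq : l.drop m = l[m] :: l.drop (m + 1) := List.drop_eq_getElem_cons hm
    have hc : ((m + 1 : Nat) : Int) - 1 = (m : Int) := by push_cast; ring
    rw [hc, PySem.List.pyRange_neg_one_cons (by omega)]
    simp only [List.foldl_cons]
    have hget : PySem.List.pyGetD l ((m : Nat) : Int) ' ' = l[m] := by
      rw [PySem.List.pyGetD_natCast]
      simp [List.getD_eq_getElem?_getD, List.getElem?_eq_getElem hm]
    have hstep : csum_step l (List.replicate (m + 1) (0 : Int) ++ csumSpec (l.drop (m + 1))) ((m : Nat) : Int)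
        = List.replicate m (0 : Int) ++ csumSpec (l.drop m) := by
      unfold csum_step
      rw [hget]
      by_cases hw : is_word_char l[m] = true
      · rw [if_pos hw]
        have hv : (if ((m : Int) == (l.length : Int) - 1) then (1 : Int)
              else PySem.List.pyGetD (List.replicate (m + 1) (0 : Int) ++ csumSpec (l.drop (m + 1))) ((m : Int) + 1) 0 + 1)
            = (csumSpec (l.drop (m + 1))).headD 0 + 1 := by
          by_cases he : m + 1 = l.length
          · have hco : ((m : Int) == (l.length : Int) - 1) = true := by
              simp only [beq_iff_eq]; omega
            rw [if_pos hco]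
            have : l.drop (m + 1) = [] := by rw [he]; exact List.drop_length
            rw [this]
            simp [csumSpec]
          · have hco : ((m : Int) == (l.length : Int) - 1) = false := by
              simp only [beq_eq_false_iff_ne, ne_eq]
              omega
            rw [if_neg (by simp [hco])]
            have hcast : ((m : Int) + 1) = ((m + 1 : Nat) : Int) := by push_cast; ring
            rw [hcast, PySem.List.pyGetD_natCast, getD_replicate_append]
        rw [hv, PySem.List.pySetD_natCast]
        have hrep : List.replicate (m + 1) (0 : Int) ++ csumSpec (l.drop (m + 1))
            = List.replicate m (0 : Int) ++ (0 : Int) :: csumSpec (l.drop (m + 1)) := by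
          rw [List.replicate_succ']
          simp
        rw [hrep, set_append_len' _ _ _ _ m (by simp)]
        rw [hdrop_eq]
        simp [csumSpec, hw]
      · simp only [Bool.not_eq_true] at hw
        rw [if_neg (by simp [hw])]
        rw [hdrop_eq, List.replicate_succ']
        simp [csumSpec, hw]
    rw [hstep]
    exact ih (by omega)

-- facts extracted from l.drop m = c :: cs
lemma drop_facts (l : List Char) (m : Nat) (c : Char) (cs : List Char)
    (h : l.drop m = c :: cs) :
    m < l.length ∧ l.getD m ' ' = c ∧ l.drop (m + 1) = cs := by
  have hm : m < l.length := by
    by_contra hge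
    rw [List.drop_eq_nil_of_le (by omega)] at h
    exact absurd h (by simp)
  have hget : l[m]? = some c := by
    have h0 : (l.drop m)[0]? = some c := by rw [h]; rfl
    rw [List.getElem?_drop] at h0
    simpa using h0
  refine ⟨hm, ?_, ?_⟩
  · rw [List.getD_eq_getElem?_getD, hget]; rfl
  · have h1 : l.drop (m + 1) = (l.drop m).drop 1 := by rw [List.drop_drop]
    rw [h1, h]
    simp

-- mid-run: A's forward loop copies the carried i_initial across the rest of a run
lemma midrun (l : List Char) : ∀ (run : List Char) (m : Nat) (rest : List Char)
    (root0 : List (Option Int)) (ii : PySem.Dict Int Int) (cnt s : Int),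
    l.drop m = run ++ rest →
    (∀ c ∈ run, is_word_char c = true) →
    root0.length = m →
    0 < m →
    is_word_char (l.getD (m - 1) ' ') = true →
    (PySem.List.pyRange (m : Int) (l.length : Int) 1).foldl (root_step l)
      (root0 ++ List.replicate (run.length + rest.length) (none : Option Int), ii, cnt, s)
    = (PySem.List.pyRange ((m + run.length : Nat) : Int) (l.length : Int) 1).foldl (root_step l)
      ((root0 ++ List.replicate run.length (some s)) ++ List.replicate rest.length (none : Option Int), ii, cnt, s) := by
  intro run
  induction run with
  | nil =>
    intro m rest root0 ii cnt s _ _ _ _ _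
    simp
  | cons c run' ih =>
    intro m rest root0 ii cnt s hdrop hall hlen hm hprev
    obtain ⟨hmlt, hget, hdrop'⟩ := drop_facts l m c (run' ++ rest) (by simpa using hdrop)
    rw [PySem.List.pyRange_one_cons (by exact_mod_cast hmlt)]
    simp only [List.foldl_cons]
    have hwc : is_word_char c = true := hall c (by simp)
    have hstep : root_step l
        (root0 ++ List.replicate ((c :: run').length + rest.length) (none : Option Int), ii, cnt, s) ((m : Nat) : Int)
        = ((root0 ++ [some s]) ++ List.replicate (run'.length + rest.length) (none : Option Int), ii, cnt, s) := by
      unfold root_step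
      have hg1 : PySem.List.pyGetD l ((m : Nat) : Int) ' ' = c := by
        rw [PySem.List.pyGetD_natCast]; exact hget
      have hg2 : PySem.List.pyGetD l (((m : Nat) : Int) - 1) ' ' = l.getD (m - 1) ' ' := by
        rw [show (((m : Nat) : Int) - 1) = ((m - 1 : Nat) : Int) by omega, PySem.List.pyGetD_natCast]
      have hb0 : (((m : Nat) : Int) == 0) = false := by
        simp only [beq_eq_false_iff_ne, ne_eq]
        omega
      rw [hg1, hg2]
      simp only [hwc, if_true, hb0, hprev, Bool.not_true, Bool.or_self]
      simp only [Bool.false_eq_true, if_false]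
      have hset : PySem.List.pySetD
          (root0 ++ List.replicate ((c :: run').length + rest.length) (none : Option Int), ii, cnt, s).1
          ((m : Nat) : Int) (some s)
          = (root0 ++ [some s]) ++ List.replicate (run'.length + rest.length) (none : Option Int) := by
        simp only [PySem.List.pySetD_natCast, List.length_cons]
        rw [show run'.length + 1 + rest.length = run'.length + rest.length + 1 by omega,
          List.replicate_succ]
        rw [set_append_len' _ _ _ _ m hlen]
        simp
      rw [hset]
    rw [hstep]
    have hmid := ih (m + 1) rest (root0 ++ [some s]) ii cnt s
      (by rw [hdrop']) (fun c hc => hall c (by simp [hc])) (by simp [hlen]) (by omega)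
      (by show is_word_char (l.getD (m + 1 - 1) ' ') = true
          rw [show m + 1 - 1 = m from rfl, hget]
          exact hwc)
    rw [show ((m : Nat) : Int) + 1 = ((m + 1 : Nat) : Int) by push_cast; ring]
    rw [hmid]
    simp only [List.length_cons]
    rw [show m + (run'.length + 1) = m + 1 + run'.length by omega]
    simp [List.replicate_succ, List.append_assoc]

-- boundary: from a token boundary on, A's forward loop produces B's run outputs
lemma boundary_aux (l : List Char) : ∀ (fuel : Nat) (suf : List Char), suf.length ≤ fuel →
    ∀ (pos cnt : Int) (m : Nat) (root0 : List (Option Int)) (ii : PySem.Dict Int Int) (iinit : Int),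
    pos = (m : Int) →
    l.drop m = suf →
    root0.length = m →
    (∀ k, ii.contains k = true → k < (m : Int)) →
    (∀ c ∈ suf.head?, is_word_char c = true → (m = 0 ∨ is_word_char (l.getD (m - 1) ' ') = false)) →
    ((PySem.List.pyRange (m : Int) (l.length : Int) 1).foldl (root_step l)
        (root0 ++ List.replicate suf.length (none : Option Int), ii, cnt, iinit)).1
      = root0 ++ (scan_runs suf pos cnt).2.1 ∧
    ((PySem.List.pyRange (m : Int) (l.length : Int) 1).foldl (root_step l)
        (root0 ++ List.replicate suf.length (none : Option Int), ii, cnt, iinit)).2.1.items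
      = ii.items ++ (scan_runs suf pos cnt).2.2 := by
  intro fuel
  induction fuel with
  | zero =>
    intro suf hle pos cnt m root0 ii iinit hpos hdrop hlen hii hH2
    have hn : suf = [] := List.eq_nil_of_length_eq_zero (by omega)
    subst hn
    have hml : l.length ≤ m := by
      by_contra hlt
      have := List.drop_eq_nil_iff.mp hdrop
      omega
    rw [PySem.List.pyRange_one_eq_nil (by exact_mod_cast hml)]
    simp [scan_runs_nil]
  | succ fuel ih =>
    intro suf hle pos cnt m root0 ii iinit hpos hdrop hlen hii hH2
    cases suf with
    | nil =>
      have hml : l.length ≤ m := by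
        by_contra hlt
        have := List.drop_eq_nil_iff.mp hdrop
        omega
      rw [PySem.List.pyRange_one_eq_nil (by exact_mod_cast hml)]
      simp [scan_runs_nil]
    | cons c cs =>
      obtain ⟨hmlt, hget, hdrop'⟩ := drop_facts l m c cs hdrop
      by_cases hw : is_word_char c = true
      · -- word character: a token start
        have hstart : m = 0 ∨ is_word_char (l.getD (m - 1) ' ') = false := hH2 c (by simp) hw
        rw [PySem.List.pyRange_one_cons (by exact_mod_cast hmlt)]
        simp only [List.foldl_cons]
        have hcond : ((((m : Nat) : Int) == 0) || !is_word_char (PySem.List.pyGetD l (((m : Nat) : Int) - 1) ' ')) = true := by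
          by_cases h0 : m = 0
          · subst h0; simp
          · rcases hstart with h | hpw
            · exact absurd h h0
            · rw [show (((m : Nat) : Int) - 1) = ((m - 1 : Nat) : Int) by omega, PySem.List.pyGetD_natCast, hpw]
              simp
        have hstep : root_step l
            (root0 ++ List.replicate (c :: cs).length (none : Option Int), ii, cnt, iinit) ((m : Nat) : Int)
            = (root0 ++ some ((m : Nat) : Int) :: List.replicate cs.length (none : Option Int),
               ii.insert ((m : Nat) : Int) cnt, cnt + 1, ((m : Nat) : Int)) := by
          unfold root_step
          have hg1 : PySem.List.pyGetD l ((m : Nat) : Int) ' ' = c := by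
            rw [PySem.List.pyGetD_natCast]; exact hget
          rw [hg1]
          simp only [hw, if_true, hcond]
          simp only [List.length_cons, List.replicate_succ, PySem.List.pySetD_natCast]
          rw [set_append_len' _ _ _ _ m hlen]
        rw [hstep]
        -- walk the rest of the run with midrun
        have hcs_split : cs = cs.takeWhile is_word_char ++ cs.dropWhile is_word_char :=
          (List.takeWhile_append_dropWhile).symm
        have hmid := midrun l (cs.takeWhile is_word_char) (m + 1) (cs.dropWhile is_word_char)
          (root0 ++ [some ((m : Nat) : Int)]) (ii.insert ((m : Nat) : Int) cnt) (cnt + 1) ((m : Nat) : Int)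
          (by rw [hdrop']; exact hcs_split)
          (fun x hx => List.mem_takeWhile_imp hx)
          (by simp [hlen]) (by omega)
          (by show is_word_char (l.getD (m + 1 - 1) ' ') = true
              rw [show m + 1 - 1 = m from rfl, hget]
              exact hw)
        have hshape : root0 ++ some ((m : Nat) : Int) :: List.replicate cs.length (none : Option Int)
            = (root0 ++ [some ((m : Nat) : Int)]) ++
              List.replicate ((cs.takeWhile is_word_char).length + (cs.dropWhile is_word_char).length) (none : Option Int) := by
          have : cs.length = (cs.takeWhile is_word_char).length + (cs.dropWhile is_word_char).length := by
            rw [← List.length_append, ← hcs_split]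
          rw [this]
          simp
        rw [show ((m : Nat) : Int) + 1 = ((m + 1 : Nat) : Int) by push_cast; ring, hshape, hmid]
        -- boundary IH on the suffix after the run
        have hrest_le : (cs.dropWhile is_word_char).length ≤ fuel := by
          have := List.length_dropWhile_le is_word_char cs
          simp only [List.length_cons] at hle
          omega
        have h5 : (l.drop (m + 1)).drop (cs.takeWhile is_word_char).length = cs.dropWhile is_word_char := by
          rw [hdrop']
          calc cs.drop (cs.takeWhile is_word_char).length
              = (cs.takeWhile is_word_char ++ cs.dropWhile is_word_char).drop
                  (cs.takeWhile is_word_char).length := by rw [← hcs_split]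
            _ = cs.dropWhile is_word_char := List.drop_left
        have hrest_drop : l.drop (m + 1 + (cs.takeWhile is_word_char).length) = cs.dropWhile is_word_char := by
          rw [← h5, List.drop_drop]
        have hih := ih (cs.dropWhile is_word_char) hrest_le
          (pos + (((c :: cs).takeWhile is_word_char).length : Int)) (cnt + 1)
          (m + 1 + (cs.takeWhile is_word_char).length)
          ((root0 ++ [some ((m : Nat) : Int)]) ++ List.replicate (cs.takeWhile is_word_char).length (some ((m : Nat) : Int)))
          (ii.insert ((m : Nat) : Int) cnt) ((m : Nat) : Int)
          (by rw [hpos]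
              simp only [List.takeWhile_cons, hw, if_true, List.length_cons]
              push_cast
              ring)
          hrest_drop
          (by simp only [List.length_append, List.length_replicate, List.length_cons,
                List.length_nil, hlen]
              try omega)
          (by intro k hk
              rw [PySem.Dict.contains_insert] at hk
              rcases Bool.or_eq_true_iff.mp hk with h | h
              · have : k = ((m : Nat) : Int) := by simpa using h
                rw [this]
                push_cast
                omega
              · have := hii k h
                push_cast
                omega)
          (by intro x hx _
              exact absurd (head?_dropWhile_false cs x hx) (by simp [*]))
        obtain ⟨hA, hB⟩ := hih
        have hscan := scan_runs_cons_word c cs pos cnt hw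
        have hdw : (c :: cs).dropWhile is_word_char = cs.dropWhile is_word_char := by
          simp [hw]
        have htwlen : ((c :: cs).takeWhile is_word_char).length = (cs.takeWhile is_word_char).length + 1 := by
          simp [hw]
        rw [hdw] at hscan
        constructor
        · rw [hA, hscan]
          simp [htwlen, hpos, List.replicate_succ, List.append_assoc]
        · rw [hB, hscan]
          have hnotc : ii.contains ((m : Nat) : Int) = false := by
            by_contra h
            have h' : ii.contains ((m : Nat) : Int) = true := by
              cases hb : ii.contains ((m : Nat) : Int)
              · exact absurd hb h
              · rfl
            have := hii _ h'
            omega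
          simp [PySem.Dict.items_insert, hnotc, hpos]
      · -- non-word character
        simp only [Bool.not_eq_true] at hw
        rw [PySem.List.pyRange_one_cons (by exact_mod_cast hmlt)]
        simp only [List.foldl_cons]
        have hstep : root_step l
            (root0 ++ List.replicate (c :: cs).length (none : Option Int), ii, cnt, iinit) ((m : Nat) : Int)
            = ((root0 ++ [none]) ++ List.replicate cs.length (none : Option Int), ii, cnt, iinit) := by
          unfold root_step
          have hg1 : PySem.List.pyGetD l ((m : Nat) : Int) ' ' = c := by
            rw [PySem.List.pyGetD_natCast]; exact hget
          rw [hg1]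
          simp [hw, List.replicate_succ, List.append_assoc]
        rw [hstep]
        have hih := ih cs (by simp only [List.length_cons] at hle; omega) (pos + 1) cnt (m + 1)
          (root0 ++ [none]) ii iinit
          (by rw [hpos]; push_cast; ring)
          hdrop'
          (by simp [hlen])
          (by intro k hk; have := hii k hk; push_cast; omega)
          (by intro x hx _
              right
              have : l.getD ((m + 1) - 1) ' ' = c := by simpa using hget
              rw [this]
              exact hw)
        rw [show ((m : Nat) : Int) + 1 = ((m + 1 : Nat) : Int) by push_cast; ring]
        obtain ⟨hA, hB⟩ := hih
        rw [scan_runs_cons_nonword c cs pos cnt hw]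
        constructor
        · rw [hA]
          simp [List.append_assoc]
        · rw [hB]

-- ===== VERDICT (by name: the statement is the Claim_ definition above) =====
theorem find_tokens_spec : Claim_equal_find_tokens := by
  intro text _
  unfold Spec_find_tokens find_tokens find_tokens_alt
  set l := text.toList with hl
  have hcs : (PySem.List.pyRange ((l.length : Int) - 1) (-1) (-1)).foldl (csum_step l)
      (List.replicate l.length (0 : Int)) = (scan_runs l 0 0).1 := by
    rw [scan_runs_csum_aux l.length l (le_refl _)]
    have := foldA_csum l l.length (le_refl _)
    simpa [csumSpec] using this
  have hb := boundary_aux l l.length l (le_refl _) 0 0 0 [] PySem.Dict.empty 0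
    (by simp) (by simp) (by simp)
    (by intro k hk; rw [PySem.Dict.contains_empty] at hk; exact absurd hk (by simp))
    (by intro c _ _; exact Or.inl rfl)
  simp only [Nat.cast_zero, List.nil_append] at hb
  obtain ⟨h1, h2⟩ := hb
  have hempty : (PySem.Dict.empty : PySem.Dict Int Int).items = [] := rfl
  rw [hempty, List.nil_append] at h2
  simp only []
  rw [hcs, h1, h2]
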